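-- pv_equiv track=rewrite | github.com/davekokel/carp_v2_mirror | scripts/migrations_normalize.py | _split_enum_vals
-- ===== SOURCE A (Python) =====
-- def _split_enum_vals(vals_raw: str):
--     out, cur, q, esc = [], [], False, False
--     for ch in vals_raw:
--         if esc:
--             cur.append(ch); esc = False; continue
--         if ch == "\\":
--             cur.append(ch); esc = True; continue
--         if ch == "'":
--             q = not q; cur.append(ch); continue
--         if ch == "," and not q:
--             s = "".join(cur).strip()
--             if s: out.append(s)
--             cur = []; continue
--         cur.append(ch)
--     s = "".join(cur).strip()
--     if s: out.append(s)
--     return out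
-- ===== SOURCE B (Python) =====
-- def _split_enum_vals(vals_raw: str):
--     # Two passes: first locate the unquoted, unescaped commas, then slice.
--     cuts = []
--     q = esc = False
--     for i, ch in enumerate(vals_raw):
--         if esc:
--             esc = False
--         elif ch == "\\":
--             esc = True
--         elif ch == "'":
--             q = not q
--         elif ch == "," and not q:
--             cuts.append(i)
--     pieces = []
--     start = 0
--     for c in cuts:
--         pieces.append(vals_raw[start:c])
--         start = c + 1
--     pieces.append(vals_raw[start:])
--     return [s for s in (p.strip() for p in pieces) if s]
-- ===== Notes on version B (the rewrite author's own statement) =====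
-- stated objective: alternative
-- what changed: Replaced A's single char-by-char loop that builds each segment in a growing buffer with a two-pass decomposition: one state-machine pass that only records the indices of splitting commas, then a slicing pass that cuts the original string at those indices, strips each slice and keeps the non-empty ones.
import Mathlib
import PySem

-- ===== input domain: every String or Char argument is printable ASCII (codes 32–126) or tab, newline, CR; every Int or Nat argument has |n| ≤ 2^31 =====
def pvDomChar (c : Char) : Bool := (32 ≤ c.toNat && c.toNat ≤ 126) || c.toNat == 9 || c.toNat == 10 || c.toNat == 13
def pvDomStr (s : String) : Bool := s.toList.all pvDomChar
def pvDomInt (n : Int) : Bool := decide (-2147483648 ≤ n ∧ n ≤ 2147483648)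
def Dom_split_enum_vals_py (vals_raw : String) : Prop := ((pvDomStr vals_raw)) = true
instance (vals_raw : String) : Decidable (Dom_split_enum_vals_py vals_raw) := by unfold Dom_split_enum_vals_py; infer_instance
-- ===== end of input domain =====

-- B replaces A's char-by-char buffer-building loop by a two-pass decomposition
-- (locate the unquoted unescaped comma positions, then slice/strip/filter); objective: alternative, same cost.

-- ===== PORT A =====
-- state-machine loop of A over the characters with state (out, cur, q, esc); "".join(cur) of single chars = String.ofList cur
def pvALoop : List Char → List String → List Char → Bool → Bool → List String
  | [], out, cur, _, _ =>
      let s := PySem.Str.strip (String.ofList cur)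
      if s ≠ "" then out ++ [s] else out
  | ch :: rest, out, cur, q, esc =>
      if esc then pvALoop rest out (cur ++ [ch]) q false
      else if ch = '\\' then pvALoop rest out (cur ++ [ch]) q true
      else if ch = '\'' then pvALoop rest out (cur ++ [ch]) (!q) esc
      else if ch = ',' ∧ q = false then
        let s := PySem.Str.strip (String.ofList cur)
        pvALoop rest (if s ≠ "" then out ++ [s] else out) [] q esc
      else pvALoop rest out (cur ++ [ch]) q esc

def split_enum_vals_py (vals_raw : String) : List String :=
  pvALoop vals_raw.toList [] [] false false

-- ===== PORT B =====
-- first pass of B: collect the indices of splitting commas (loop over enumerate(vals_raw))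
def pvBCuts : List (Int × Char) → List Int → Bool → Bool → List Int
  | [], cuts, _, _ => cuts
  | (i, ch) :: rest, cuts, q, esc =>
      if esc then pvBCuts rest cuts q false
      else if ch = '\\' then pvBCuts rest cuts q true
      else if ch = '\'' then pvBCuts rest cuts (!q) esc
      else if ch = ',' ∧ q = false then pvBCuts rest (cuts ++ [i]) q esc
      else pvBCuts rest cuts q esc

-- second pass of B: slice vals_raw between the cuts (Python string slice = list slice on code points)
def pvBPieces : List Int → Int → List Char → List (List Char)
  | [], start, l => [PySem.List.slice l (some start) none]
  | c :: cs, start, l => PySem.List.slice l (some start) (some c) :: pvBPieces cs (c + 1) l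

def split_enum_vals_py_alt (vals_raw : String) : List String :=
  ((pvBPieces (pvBCuts (PySem.List.enumerate vals_raw.toList 0) [] false false) 0 vals_raw.toList).map
      (fun p => PySem.Str.strip (String.ofList p))).filter (fun s => s ≠ "")

-- ===== PRECONDITION & SPEC =====
def Spec_split_enum_vals_py (vals_raw : String) (out : List String) : Prop := out = split_enum_vals_py_alt vals_raw
instance (vals_raw : String) (out : List String) : Decidable (Spec_split_enum_vals_py vals_raw out) := by unfold Spec_split_enum_vals_py; infer_instance

-- ===== CLAIM (what is proved, stated in full; the proofs are below) =====
def Claim_equal_split_enum_vals_py : Prop := ∀ (vals_raw : String), Dom_split_enum_vals_py vals_raw → Spec_split_enum_vals_py vals_raw (split_enum_vals_py vals_raw)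

-- ===== LEMMAS AND PROOFS =====

-- reference segmentation: the raw character segments between splitting commas
def pvConsHead (c : Char) : List (List Char) → List (List Char)
  | [] => [[c]]
  | h :: t => (c :: h) :: t

def pvSegs : List Char → Bool → Bool → List (List Char)
  | [], _, _ => [[]]
  | ch :: rest, q, esc =>
      if esc then pvConsHead ch (pvSegs rest q false)
      else if ch = '\\' then pvConsHead ch (pvSegs rest q true)
      else if ch = '\'' then pvConsHead ch (pvSegs rest (!q) esc)
      else if ch = ',' ∧ q = false then [] :: pvSegs rest q esc
      else pvConsHead ch (pvSegs rest q esc)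

def pvAttach (cur : List Char) : List (List Char) → List (List Char)
  | [] => [cur]
  | h :: t => (cur ++ h) :: t

def pvKeep (L : List (List Char)) : List String :=
  (L.map (fun p => PySem.Str.strip (String.ofList p))).filter (fun s => s ≠ "")

lemma pvConsHead_ne_nil (c : Char) (L : List (List Char)) : pvConsHead c L ≠ [] := by
  cases L <;> simp [pvConsHead]

lemma pvSegs_ne_nil (cs : List Char) (q esc : Bool) : pvSegs cs q esc ≠ [] := by
  cases cs with
  | nil => simp [pvSegs]
  | cons c rest =>
      simp only [pvSegs]
      split_ifs <;> simp [pvConsHead_ne_nil]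

lemma pvAttach_consHead (cur : List Char) (c : Char) (L : List (List Char)) :
    pvAttach cur (pvConsHead c L) = pvAttach (cur ++ [c]) L := by
  cases L <;> simp [pvAttach, pvConsHead]

lemma pvAttach_nil (L : List (List Char)) (h : L ≠ []) : pvAttach [] L = L := by
  cases L with
  | nil => exact absurd rfl h
  | cons a t => simp [pvAttach]

lemma pvKeep_cons (p : List Char) (L : List (List Char)) :
    pvKeep (p :: L) =
      (if PySem.Str.strip (String.ofList p) ≠ "" then [PySem.Str.strip (String.ofList p)] else []) ++ pvKeep L := by
  simp only [pvKeep, List.map_cons, List.filter_cons]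
  split_ifs with h h2 h3 <;> simp_all

lemma pvALoop_eq (cs : List Char) : ∀ (out : List String) (cur : List Char) (q esc : Bool),
    pvALoop cs out cur q esc = out ++ pvKeep (pvAttach cur (pvSegs cs q esc)) := by
  induction cs with
  | nil =>
      intro out cur q esc
      simp only [pvALoop, pvSegs, pvAttach, pvKeep, List.map_cons, List.map_nil, List.filter]
      split_ifs with h <;> simp_all
  | cons ch rest ih =>
      intro out cur q esc
      simp only [pvALoop, pvSegs]
      split_ifs with h1 h2 h3 h4 h5
      · rw [ih, pvAttach_consHead]
      · rw [ih, pvAttach_consHead]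
      · rw [ih, pvAttach_consHead]
      · rw [ih, pvAttach_nil _ (pvSegs_ne_nil _ _ _)]
        have hat : pvAttach cur ([] :: pvSegs rest q esc) = cur :: pvSegs rest q esc := by
          simp [pvAttach]
        rw [hat, pvKeep_cons]
        simp [h5, List.append_assoc]
      · rw [ih, pvAttach_nil _ (pvSegs_ne_nil _ _ _)]
        have hat : pvAttach cur ([] :: pvSegs rest q esc) = cur :: pvSegs rest q esc := by
          simp [pvAttach]
        rw [hat, pvKeep_cons]
        simp [h5]
      · rw [ih, pvAttach_consHead]

-- B side --------------------------------------------------------------------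

lemma pvBCuts_acc (l : List (Int × Char)) : ∀ (cuts : List Int) (q esc : Bool),
    pvBCuts l cuts q esc = cuts ++ pvBCuts l [] q esc := by
  induction l with
  | nil => intro cuts q esc; simp [pvBCuts]
  | cons p rest ih =>
      intro cuts q esc
      obtain ⟨i, ch⟩ := p
      simp only [pvBCuts]
      split_ifs
      · rw [ih]
      · rw [ih]
      · rw [ih]
      · rw [ih (cuts ++ [i]), ih ([] ++ [i])]; simp
      · rw [ih]

-- every cut is the index component of some enumerated pair
lemma pvBCuts_sub (l : List (Int × Char)) : ∀ (q esc : Bool) (x : Int),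
    x ∈ pvBCuts l [] q esc → ∃ c, (x, c) ∈ l := by
  induction l with
  | nil => intro q esc x hx; simp [pvBCuts] at hx
  | cons p rest ih =>
      intro q esc x hx
      obtain ⟨i, ch⟩ := p
      simp only [pvBCuts] at hx
      split_ifs at hx
      · obtain ⟨c, hc⟩ := ih _ _ _ hx; exact ⟨c, List.mem_cons_of_mem _ hc⟩
      · obtain ⟨c, hc⟩ := ih _ _ _ hx; exact ⟨c, List.mem_cons_of_mem _ hc⟩
      · obtain ⟨c, hc⟩ := ih _ _ _ hx; exact ⟨c, List.mem_cons_of_mem _ hc⟩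
      · rw [pvBCuts_acc] at hx
        simp only [List.nil_append, List.mem_append, List.mem_singleton] at hx
        rcases hx with h | h
        · exact ⟨ch, by simp [h]⟩
        · obtain ⟨c, hc⟩ := ih _ _ _ h; exact ⟨c, List.mem_cons_of_mem _ hc⟩
      · obtain ⟨c, hc⟩ := ih _ _ _ hx; exact ⟨c, List.mem_cons_of_mem _ hc⟩

lemma pvBCuts_lb (cs : List Char) (j : Int) (q esc : Bool) (x : Int)
    (hx : x ∈ pvBCuts (PySem.List.enumerate cs j) [] q esc) : j ≤ x := by
  obtain ⟨c, hc⟩ := pvBCuts_sub _ _ _ _ hx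
  rw [PySem.List.mem_enumerate_iff] at hc
  obtain ⟨k, hk, hp⟩ := hc
  have : x = j + (k : Int) := congrArg Prod.fst hp
  omega

lemma pvBPieces_cons (full : List Char) (m : Nat) (c : Char) (rest : List Char)
    (cl : List Int) (hcl : ∀ x ∈ cl, (m : Int) < x) (hdrop : full.drop m = c :: rest) :
    pvBPieces cl (m : Int) full = pvConsHead c (pvBPieces cl ((m : Int) + 1) full) := by
  have hdrop1 : full.drop (m + 1) = rest := by
    rw [← List.drop_drop, hdrop]; simp
  have hcast : (m : Int) + 1 = ((m + 1 : Nat) : Int) := by push_cast; ring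
  cases cl with
  | nil =>
      simp only [pvBPieces, pvConsHead, hcast]
      rw [PySem.List.slice_from_natCast, PySem.List.slice_from_natCast, hdrop, hdrop1]
  | cons k cl' =>
      have hk : (m : Int) < k := hcl k (by simp)
      have hkn : m < k.toNat := by omega
      simp only [pvBPieces, pvConsHead, hcast]
      rw [PySem.List.slice_toNat full (by positivity) (by omega),
          PySem.List.slice_toNat full (by positivity) (by omega)]
      simp only [Int.toNat_natCast]
      rw [hdrop, hdrop1]
      have ht : k.toNat - m = (k.toNat - (m + 1)) + 1 := by omega
      rw [ht, List.take_succ_cons]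

lemma pvB_main (cs : List Char) : ∀ (q esc : Bool) (full pre : List Char), full = pre ++ cs →
    pvBPieces (pvBCuts (PySem.List.enumerate cs ((pre.length : Nat) : Int)) [] q esc)
        ((pre.length : Nat) : Int) full = pvSegs cs q esc := by
  induction cs with
  | nil =>
      intro q esc full pre hfull
      simp only [PySem.List.enumerate, pvBCuts, pvBPieces, pvSegs]
      rw [PySem.List.slice_from_natCast, hfull]
      simp
  | cons ch rest ih =>
      intro q esc full pre hfull
      have hcast : ((pre.length : Nat) : Int) + 1 = (((pre ++ [ch]).length : Nat) : Int) := by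
        simp only [List.length_append, List.length_cons, List.length_nil]
        push_cast; ring
      have hdrop : full.drop pre.length = ch :: rest := by
        rw [hfull]; simp
      have happ : full = (pre ++ [ch]) ++ rest := by rw [hfull]; simp
      rw [PySem.List.enumerate_cons]
      simp only [pvBCuts, pvSegs]
      split_ifs with h1 h2 h3 h4
      · rw [pvBPieces_cons full pre.length ch rest _
            (fun x hx => by have := pvBCuts_lb rest _ _ _ x hx; omega) hdrop,
          hcast, ih _ _ full (pre ++ [ch]) happ]
      · rw [pvBPieces_cons full pre.length ch rest _
            (fun x hx => by have := pvBCuts_lb rest _ _ _ x hx; omega) hdrop,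
          hcast, ih _ _ full (pre ++ [ch]) happ]
      · rw [pvBPieces_cons full pre.length ch rest _
            (fun x hx => by have := pvBCuts_lb rest _ _ _ x hx; omega) hdrop,
          hcast, ih _ _ full (pre ++ [ch]) happ]
      · rw [pvBCuts_acc]
        simp only [List.nil_append, List.singleton_append, pvBPieces]
        rw [PySem.List.slice_natCast, hcast, ih _ _ full (pre ++ [ch]) happ]
        simp
      · rw [pvBPieces_cons full pre.length ch rest _
            (fun x hx => by have := pvBCuts_lb rest _ _ _ x hx; omega) hdrop,
          hcast, ih _ _ full (pre ++ [ch]) happ]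

-- ===== VERDICT (by name: the statement is the Claim_ definition above) =====
theorem split_enum_vals_py_spec : Claim_equal_split_enum_vals_py := by
  intro vals_raw _
  show split_enum_vals_py vals_raw = split_enum_vals_py_alt vals_raw
  unfold split_enum_vals_py split_enum_vals_py_alt
  rw [pvALoop_eq, pvAttach_nil _ (pvSegs_ne_nil _ _ _), List.nil_append]
  have h := pvB_main vals_raw.toList false false vals_raw.toList [] (by simp)
  simp only [List.length_nil, Nat.cast_zero] at h
  rw [h]
  rfl
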